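-- pv_equiv track=rewrite | github.com/Safaet-Rabbi/Python | Codeforce/716A.py | remaining_words
-- ===== SOURCE A (Python) =====
-- def remaining_words(n, c, times):
--     # Initially, the screen is empty
--     remaining = 0
--     last_time = 0
--
--     for i in range(n):
--         if i == 0:
--             # First word typed
--             remaining = 1
--         else:
--             # Calculate the time difference between current and last typed word
--             if times[i] - last_time > c:
--                 # If the difference is greater than c, reset the count
--                 remaining = 1
--             else:
--                 # Otherwise, just increment the count
--                 remaining += 1
--
--         # Update the last time
--         last_time = times[i]
--
--     return remaining
-- ===== SOURCE B (Python) =====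
-- def remaining_words(n, c, times):
--     # Backward scan: the answer is the length of the trailing run of words
--     # (among the first n) whose consecutive gaps are <= c.
--     if n <= 0:
--         return 0
--     remaining = 1
--     for i in range(n - 1, 0, -1):
--         if times[i] - times[i - 1] <= c:
--             remaining += 1
--         else:
--             break
--     return remaining
-- ===== Notes on version B (the rewrite author's own statement) =====
-- stated objective: alternative
-- what changed: B scans backward from index n-1 maintaining the trailing-run length directly and breaks at the first gap > c, instead of A's full forward pass that resets a counter on each large gap.
import Mathlib
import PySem

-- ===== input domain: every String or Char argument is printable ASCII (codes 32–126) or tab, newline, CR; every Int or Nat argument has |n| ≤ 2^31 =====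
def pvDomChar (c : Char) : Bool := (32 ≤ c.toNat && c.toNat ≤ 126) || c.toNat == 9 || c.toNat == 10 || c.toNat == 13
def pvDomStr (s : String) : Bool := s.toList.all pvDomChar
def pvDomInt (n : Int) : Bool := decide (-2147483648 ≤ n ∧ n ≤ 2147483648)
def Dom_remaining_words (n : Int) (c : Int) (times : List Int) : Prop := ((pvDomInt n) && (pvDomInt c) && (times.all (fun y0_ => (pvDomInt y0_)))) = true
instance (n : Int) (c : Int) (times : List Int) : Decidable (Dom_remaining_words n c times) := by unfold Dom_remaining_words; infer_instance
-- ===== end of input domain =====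

-- B scans backward from the end with early break; A does a full forward pass with a reset counter.
-- ===== PORT A =====
def remaining_words (n : Int) (c : Int) (times : List Int) : Int :=
  ((PySem.List.pyRange 0 n 1).foldl
    (fun (st : Int × Int) i =>
      let t := PySem.List.pyGetD times i 0
      let remaining :=
        if i == 0 then 1
        else if t - st.2 > c then 1 else st.1 + 1
      (remaining, t))
    (0, 0)).1

-- ===== PORT B =====
-- backward scan with break, as structural recursion on the index (go k = run length ending at index k;
-- returning 1 without recursing is the loop's break)
def remaining_words_altGo (c : Int) (times : List Int) : Nat → Int
  | 0 => 1
  | k + 1 =>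
    if PySem.List.pyGetD times ((k : Int) + 1) 0 - PySem.List.pyGetD times (k : Int) 0 ≤ c then
      remaining_words_altGo c times k + 1
    else 1

def remaining_words_alt (n : Int) (c : Int) (times : List Int) : Int :=
  if n ≤ 0 then 0 else remaining_words_altGo c times (n - 1).toNat

-- ===== PRECONDITION & SPEC =====
-- Pre_: exactly the inputs where A's times[i] accesses are in range (A raises IndexError when n > len(times))
def Pre_remaining_words (n : Int) (c : Int) (times : List Int) : Prop := n ≤ (times.length : Int)
instance (n : Int) (c : Int) (times : List Int) : Decidable (Pre_remaining_words n c times) := by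
  unfold Pre_remaining_words; infer_instance

def pvWitness_remaining_words : Int × Int × List Int := (4, 3, [1, 3, 10, 12])

def Spec_remaining_words (n : Int) (c : Int) (times : List Int) (out : Int) : Prop := out = remaining_words_alt n c times
instance (n : Int) (c : Int) (times : List Int) (out : Int) : Decidable (Spec_remaining_words n c times out) := by unfold Spec_remaining_words; infer_instance

-- ===== CLAIM (what is proved, stated in full; the proofs are below) =====
def Claim_equal_remaining_words : Prop := ∀ (n : Int) (c : Int) (times : List Int), Dom_remaining_words n c times → Pre_remaining_words n c times → Spec_remaining_words n c times (remaining_words n c times)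

-- ===== LEMMAS AND PROOFS =====

-- invariant of A's fold: after processing indices 0..m-1 (1 ≤ m ≤ len),
-- the state is (trailing-run length ending at m-1, times[m-1])
theorem remaining_words_foldl_inv (c : Int) (times : List Int) (m : Nat)
    (h1 : 1 ≤ m) (h2 : m ≤ times.length) :
    ((PySem.List.pyRange 0 (m : Int) 1).foldl
      (fun (st : Int × Int) i =>
        let t := PySem.List.pyGetD times i 0
        let remaining :=
          if i == 0 then 1
          else if t - st.2 > c then 1 else st.1 + 1
        (remaining, t))
      (0, 0))
    = (remaining_words_altGo c times (m - 1), PySem.List.pyGetD times ((m : Int) - 1) 0) := by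
  induction m with
  | zero => omega
  | succ k ih =>
    rcases Nat.eq_or_lt_of_le h1 with h | h
    · -- m = 1
      have hk : k = 0 := by omega
      subst hk
      have hr : PySem.List.pyRange 0 (1 : Int) 1 = [0] := by decide
      push_cast
      rw [hr]
      simp [remaining_words_altGo]
    · -- k ≥ 1
      have hk1 : 1 ≤ k := by omega
      have hk2 : k ≤ times.length := by omega
      obtain ⟨j, rfl⟩ : ∃ j, k = j + 1 := ⟨k - 1, by omega⟩
      push_cast
      have hsplit : PySem.List.pyRange 0 ((j : Int) + 1 + 1) 1
          = PySem.List.pyRange 0 ((j : Int) + 1) 1 ++ [(j : Int) + 1] :=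
        PySem.List.pyRange_one_succ_right (a := 0) (b := (j : Int) + 1) (by omega)
      have ih' := ih hk1 hk2
      push_cast at ih'
      rw [hsplit, List.foldl_append, ih']
      have hkne : (((j : Int) + 1) == 0) = false := by simp; omega
      simp only [List.foldl_cons, List.foldl_nil, hkne,
        remaining_words_altGo]
      push_cast
      have e1 : (j : Int) + 1 - 1 = (j : Int) := by ring
      have e2 : (j : Int) + 1 + 1 - 1 = (j : Int) + 1 := by ring
      rw [e1, e2]
      split_ifs with hb1 hb2 <;> simp_all <;> omega

-- ===== VERDICT (by name: the statement is the Claim_ definition above) =====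
theorem remaining_words_spec : Claim_equal_remaining_words := by
  intro n c times _ hpre
  unfold Spec_remaining_words remaining_words remaining_words_alt
  by_cases hn : n ≤ 0
  · rw [PySem.List.pyRange_one_eq_nil hn]
    simp [hn]
  · have hm : n = ((n.toNat : Int)) := by omega
    have h1 : 1 ≤ n.toNat := by omega
    have h2 : n.toNat ≤ times.length := by
      unfold Pre_remaining_words at hpre; omega
    rw [hm, remaining_words_foldl_inv c times n.toNat h1 h2]
    have hne : ¬ ((n.toNat : Int) ≤ 0) := by omega
    rw [if_neg hne]
    show remaining_words_altGo c times (n.toNat - 1) = _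
    congr 1
    omega
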